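-- pv_equiv track=rewrite | github.com/ODCS1/PersonalTechStudies | python/exercicios/lista8/ex7.py | ordem_crescente_while
-- ===== SOURCE A (Python) =====
-- def ordem_crescente_while(t: tuple[int]) -> bool:
--     if not isinstance(t, tuple):
--         raise ValueError
--
--     i = 0
--     while i < len(t) - 1:
--         if t[i] > t[i + 1]:
--             return False
--         i += 1
--     return True
-- ===== SOURCE B (Python) =====
-- def ordem_crescente_while(t: tuple[int]) -> bool:
--     if not isinstance(t, tuple):
--         raise ValueError
--     return list(t) == sorted(t)
-- ===== Notes on version B (the rewrite author's own statement) =====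
-- stated objective: simpler
-- what changed: Replaces the index-based while loop with early exit over adjacent pairs by a sort-and-compare: the list equals its sorted version iff it is non-decreasing.
import Mathlib
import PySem

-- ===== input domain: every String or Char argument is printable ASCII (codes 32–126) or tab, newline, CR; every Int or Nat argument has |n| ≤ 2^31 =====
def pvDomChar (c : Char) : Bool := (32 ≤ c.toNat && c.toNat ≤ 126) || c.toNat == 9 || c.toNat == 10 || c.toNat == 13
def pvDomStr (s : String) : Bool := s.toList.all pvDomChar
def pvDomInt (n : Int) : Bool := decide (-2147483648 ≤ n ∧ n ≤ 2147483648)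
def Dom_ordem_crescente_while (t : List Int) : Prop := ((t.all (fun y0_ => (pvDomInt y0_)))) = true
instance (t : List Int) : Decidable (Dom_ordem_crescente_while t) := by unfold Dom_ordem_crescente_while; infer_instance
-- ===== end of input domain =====

-- B replaces A's early-exit adjacent-pair while loop by sort-and-compare (list(t) == sorted(t)); simpler, not faster.
-- The Python-level isinstance(t, tuple) ValueError guard never fires on the modelled domain (tuples of ints), so both ports are total.

-- ===== PORT A =====
-- while i < len(t) - 1: if t[i] > t[i+1]: return False; i += 1 — indices are in range, so getD is exact
def ordem_crescente_while_loop (t : List Int) (i : Nat) : Bool :=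
  if i < t.length - 1 then
    if t.getD i 0 > t.getD (i + 1) 0 then false
    else ordem_crescente_while_loop t (i + 1)
  else true
termination_by t.length - 1 - i

def ordem_crescente_while (t : List Int) : Bool :=
  ordem_crescente_while_loop t 0

-- ===== PORT B =====
def ordem_crescente_while_alt (t : List Int) : Bool :=
  t == PySem.List.sorted t (fun x => x) false

-- ===== PRECONDITION & SPEC =====
def Spec_ordem_crescente_while (t : List Int) (out : Bool) : Prop := out = ordem_crescente_while_alt t
instance (t : List Int) (out : Bool) : Decidable (Spec_ordem_crescente_while t out) := by unfold Spec_ordem_crescente_while; infer_instance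

-- ===== CLAIM (what is proved, stated in full; the proofs are below) =====
def Claim_equal_ordem_crescente_while : Prop := ∀ (t : List Int), Dom_ordem_crescente_while t → Spec_ordem_crescente_while t (ordem_crescente_while t)

-- ===== LEMMAS AND PROOFS =====

theorem ordem_crescente_while_loop_iff (t : List Int) (n i : Nat) (hn : t.length - 1 - i ≤ n) :
    ordem_crescente_while_loop t i = true ↔
      ∀ j, i ≤ j → j + 1 < t.length → t.getD j 0 ≤ t.getD (j + 1) 0 := by
  induction n generalizing i with
  | zero =>
    unfold ordem_crescente_while_loop
    rw [if_neg (by omega)]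
    constructor
    · intro _ j hij hj; omega
    · intro _; rfl
  | succ n ih =>
    unfold ordem_crescente_while_loop
    by_cases h : i < t.length - 1
    · rw [if_pos h]
      by_cases hgt : t.getD i 0 > t.getD (i + 1) 0
      · rw [if_pos hgt]
        constructor
        · intro hfalse; cases hfalse
        · intro hall
          exact absurd (hall i le_rfl (by omega)) (not_le.mpr hgt)
      · rw [if_neg hgt]
        rw [ih (i + 1) (by omega)]
        constructor
        · intro hall j hij hj
          rcases Nat.eq_or_lt_of_le hij with rfl | hlt
          · exact not_lt.mp hgt
          · exact hall j hlt hj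
        · intro hall j hij hj
          exact hall j (by omega) hj
    · rw [if_neg h]
      constructor
      · intro _ j hij hj; omega
      · intro _; rfl

theorem adj_mono (l : List Int) (h : ∀ (j : Nat) (hj : j + 1 < l.length), l.getD j 0 ≤ l.getD (j + 1) 0) :
    ∀ (i j : Nat) (hj : j < l.length), i ≤ j → l.getD i 0 ≤ l.getD j 0 := by
  intro i j
  induction j with
  | zero =>
    intro hj hij
    have : i = 0 := by omega
    subst this; exact le_rfl
  | succ j ih =>
    intro hj hij
    rcases Nat.lt_succ_iff_lt_or_eq.mp (Nat.lt_succ_of_le hij) with hlt | rfl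
    · exact le_trans (ih (by omega) (by omega)) (h j hj)
    · exact le_rfl

theorem ordem_crescente_while_iff_pairwise (t : List Int) :
    ordem_crescente_while t = true ↔ t.Pairwise (· ≤ ·) := by
  rw [List.pairwise_iff_getElem]
  unfold ordem_crescente_while
  rw [ordem_crescente_while_loop_iff t (t.length) 0 (by omega)]
  constructor
  · intro hall i j hi hj hij
    have := adj_mono t (fun k hk => hall k (Nat.zero_le _) hk) i j hj (by omega)
    rwa [List.getD_eq_getElem t 0 (by omega), List.getD_eq_getElem t 0 (by omega)] at this
  · intro hall j _ hj
    rw [List.getD_eq_getElem t 0 (by omega), List.getD_eq_getElem t 0 (by omega)]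
    exact hall j (j + 1) (by omega) (by omega) (by omega)

theorem ordem_crescente_while_alt_iff_pairwise (t : List Int) :
    ordem_crescente_while_alt t = true ↔ t.Pairwise (· ≤ ·) := by
  unfold ordem_crescente_while_alt
  rw [beq_iff_eq]
  constructor
  · intro h
    have hp := PySem.List.sorted_pairwise (xs := t) (key := fun x => x)
    rw [← h] at hp
    exact hp
  · intro hp
    exact (PySem.List.sorted_eq_self_of_pairwise t (fun x => x) hp).symm

-- ===== VERDICT (by name: the statement is the Claim_ definition above) =====
theorem ordem_crescente_while_spec : Claim_equal_ordem_crescente_while := by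
  intro t _
  unfold Spec_ordem_crescente_while
  rw [Bool.eq_iff_iff, ordem_crescente_while_iff_pairwise, ordem_crescente_while_alt_iff_pairwise]
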